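-- pv_equiv track=rewrite | github.com/vskarleas/INF101-S1-Python | TD Exercises/exercise1.11.7.py | simplifier
-- ===== SOURCE A (Python) =====
-- def simplifier(poly): #Υπάρχει ένα θέμα εδώ. Θα το ξανακάνω με το αξαπητό μου deepcopy
--     newdico = {}
--     for key, value in poly.items():
--         if value == 0:
--             newdico.update({key: value})
--
--     for newKey, newValue in newdico.items():
--         poly.pop(newKey)
--     return poly
-- ===== SOURCE B (Python) =====
-- def simplifier(poly):
--     # Simpler decomposition: keep the survivors, then clear and repopulate the
--     # same dict object (same in-place mutation and return value as A).
--     kept = {k: v for k, v in poly.items() if v != 0}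
--     poly.clear()
--     poly.update(kept)
--     return poly
-- ===== Notes on version B (the rewrite author's own statement) =====
-- stated objective: simpler
-- what changed: Instead of collecting the zero-valued keys into a second dict and then popping them one by one, B builds the surviving entries in one comprehension and repopulates the cleared dict with them (no per-key removal loop).
import Mathlib
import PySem

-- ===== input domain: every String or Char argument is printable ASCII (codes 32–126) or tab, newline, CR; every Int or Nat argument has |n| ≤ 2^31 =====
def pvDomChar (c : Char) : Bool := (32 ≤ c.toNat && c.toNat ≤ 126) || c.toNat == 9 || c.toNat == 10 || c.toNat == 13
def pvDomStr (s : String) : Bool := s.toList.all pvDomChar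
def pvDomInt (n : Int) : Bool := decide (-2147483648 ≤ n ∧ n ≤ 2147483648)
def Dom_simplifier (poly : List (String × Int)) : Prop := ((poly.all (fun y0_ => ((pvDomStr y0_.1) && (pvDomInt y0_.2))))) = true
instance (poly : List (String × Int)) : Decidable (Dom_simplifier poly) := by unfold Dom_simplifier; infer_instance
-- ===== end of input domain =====

-- B replaces A's collect-zero-keys-then-pop-each loop by one survivors comprehension plus clear/update
-- (same in-place mutation of the argument dict; the theorem is about the returned entries).


-- ===== PORT A =====
def simplifier (poly : List (String × Int)) : List (String × Int) :=
  let d := PySem.Dict.ofList poly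
  -- newdico = {}; for key, value in poly.items(): if value == 0: newdico.update({key: value})
  let newdico := d.items.foldl
    (fun nd p => if p.2 == 0 then nd.insert p.1 p.2 else nd) PySem.Dict.empty
  -- for newKey, newValue in newdico.items(): poly.pop(newKey)
  -- (poly.pop is PySem.Dict.pop?; the none branch is Python's KeyError, unreachable here
  --  since every key of newdico is a still-present key of poly)
  let res := newdico.items.foldl
    (fun dd p => match dd.pop? p.1 with | some (_, dd') => dd' | none => dd) d
  res.items

-- ===== PORT B =====
def simplifier_alt (poly : List (String × Int)) : List (String × Int) :=
  -- kept = {k: v for k, v in poly.items() if v != 0}: poly's keys are unique, so the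
  -- comprehension's items are exactly the filtered items; poly.clear(); poly.update(kept)
  -- leaves poly holding precisely those items, which are returned.
  (PySem.Dict.ofList poly).items.filter (fun p => !(p.2 == 0))

-- ===== PRECONDITION & SPEC =====
def Spec_simplifier (poly : List (String × Int)) (out : List (String × Int)) : Prop := out = simplifier_alt poly
instance (poly : List (String × Int)) (out : List (String × Int)) : Decidable (Spec_simplifier poly out) := by unfold Spec_simplifier; infer_instance

-- ===== CLAIM (what is proved, stated in full; the proofs are below) =====
def Claim_equal_simplifier : Prop := ∀ (poly : List (String × Int)), Dom_simplifier poly → Spec_simplifier poly (simplifier poly)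

-- ===== LEMMAS AND PROOFS =====

-- with nodup keys, the key of an entry determines the entry
theorem key_inj {L : List (String × Int)} (h : (L.map Prod.fst).Nodup)
    {p q : String × Int} (hp : p ∈ L) (hq : q ∈ L) (hk : p.1 = q.1) : p = q := by
  induction L with
  | nil => cases hp
  | cons a t ih =>
    simp only [List.map_cons, List.nodup_cons] at h
    rcases List.mem_cons.1 hp with rfl | hp' <;> rcases List.mem_cons.1 hq with rfl | hq'
    · rfl
    · exact absurd (hk ▸ (List.mem_map.2 ⟨q, hq', rfl⟩)) h.1
    · exact absurd (hk ▸ (List.mem_map.2 ⟨p, hp', rfl⟩)) h.1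
    · exact ih h.2 hp' hq'

-- one pop step acts on the items list as a filter
theorem pop_step_items (dd : PySem.Dict String Int) (k : String) :
    (match dd.pop? k with | some (_, dd') => dd' | none => dd).items
      = dd.items.filter (fun q => !(q.1 == k)) := by
  simp only [PySem.Dict.pop?]
  cases h : dd.get? k with
  | some v => simp [PySem.Dict.erase]
  | none =>
    have hk : k ∉ dd.keys := (PySem.Dict.get?_eq_none_iff_not_mem_keys dd k).1 h
    simp only [Option.map_none]
    refine (List.filter_eq_self.2 (fun q hq => ?_)).symm
    have hne : ¬ q.1 = k := fun he => hk (he ▸ List.mem_map.2 ⟨q, hq, rfl⟩)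
    simp [hne]

-- the whole pop loop filters out every key occurring in zs
theorem pop_loop_items (zs : List (String × Int)) (dd : PySem.Dict String Int) :
    (zs.foldl (fun dd p => match dd.pop? p.1 with | some (_, dd') => dd' | none => dd) dd).items
      = dd.items.filter (fun q => zs.all (fun p => !(q.1 == p.1))) := by
  induction zs generalizing dd with
  | nil => simp
  | cons z t ih =>
    simp only [List.foldl_cons, ih, pop_step_items, List.filter_filter, List.all_cons]
    exact List.filter_congr (fun q _ => by rw [Bool.and_comm])

-- the first loop collects exactly the zero-valued entries, in order
theorem zeros_loop_items (L : List (String × Int)) (nd : PySem.Dict String Int)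
    (hnd : (L.map Prod.fst).Nodup) (hfresh : ∀ p ∈ L, nd.contains p.1 = false) :
    (L.foldl (fun nd p => if p.2 == 0 then nd.insert p.1 p.2 else nd) nd).items
      = nd.items ++ L.filter (fun p => p.2 == 0) := by
  induction L generalizing nd with
  | nil => simp
  | cons a t ih =>
    simp only [List.map_cons, List.nodup_cons] at hnd
    have ha : a.1 ∉ t.map Prod.fst := hnd.1
    simp only [List.foldl_cons, List.filter_cons]
    by_cases h0 : a.2 = 0
    · have hc : (a.2 == 0) = true := by simp [h0]
      rw [if_pos hc]
      have hfresh' : ∀ p ∈ t, (nd.insert a.1 a.2).contains p.1 = false := by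
        intro p hp
        rw [PySem.Dict.contains_insert]
        have : ¬ p.1 = a.1 := fun he => ha (he ▸ List.mem_map.2 ⟨p, hp, rfl⟩)
        simp [this, hfresh p (List.mem_cons_of_mem a hp)]
      rw [ih (nd.insert a.1 a.2) hnd.2 hfresh',
        PySem.Dict.items_insert_of_not_contains nd a.2 (hfresh a (List.mem_cons_self))]
      simp [hc]
    · have hc : ¬ (a.2 == 0) = true := by simp [h0]
      have hfresh' : ∀ p ∈ t, nd.contains p.1 = false :=
        fun p hp => hfresh p (List.mem_cons_of_mem a hp)
      rw [if_neg hc, ih nd hnd.2 hfresh']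
      simp [hc]

-- ===== VERDICT (by name: the statement is the Claim_ definition above) =====
theorem simplifier_spec : Claim_equal_simplifier := by
  intro poly _
  unfold Spec_simplifier simplifier simplifier_alt
  dsimp only
  have hnd : ((PySem.Dict.ofList poly).items.map Prod.fst).Nodup :=
    PySem.Dict.nodup_keys_ofList poly
  set L := (PySem.Dict.ofList poly).items with hL
  rw [zeros_loop_items L PySem.Dict.empty hnd (fun p _ => PySem.Dict.contains_empty p.1),
    pop_loop_items]
  simp only [PySem.Dict.empty, List.nil_append]
  refine List.filter_congr (fun q hq => ?_)
  by_cases h0 : q.2 = 0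
  · have hqz : q ∈ L.filter (fun p => p.2 == 0) := List.mem_filter.2 ⟨hq, by simp [h0]⟩
    have : ¬ (L.filter (fun p => p.2 == 0)).all (fun p => !(q.1 == p.1)) = true := by
      intro hall
      have := List.all_eq_true.1 hall q hqz
      simp at this
    simp [h0, this]
  · have hall : (L.filter (fun p => p.2 == 0)).all (fun p => !(q.1 == p.1)) = true := by
      refine List.all_eq_true.2 (fun p hp => ?_)
      have hpL := (List.mem_filter.1 hp).1
      have hp0 : p.2 = 0 := by simpa using (List.mem_filter.1 hp).2
      have hne : ¬ q.1 = p.1 := fun he => h0 ((key_inj hnd hq hpL he) ▸ hp0)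
      simp [hne]
    simp [h0, hall]
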